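-- pv_equiv track=rewrite | github.com/arthurhoreanu/uni | fp/cons/recap_partial/main.py | build_and_check
-- ===== SOURCE A (Python) =====
-- import math
--
-- def build_and_check(num):
--     nc = int(math.log10(num)) + 1
--     k = nc % 3 #posibile poz mult de trei
--     num //= 10 ** k
--     nr_nou = 0
--     ogl = 0
--     p = 1
--     while num != 0:
--         uc = num % 10
--         num //= 1000
--         nr_nou = nr_nou * 10 + uc
--         ogl = ogl + p * uc
--         p *= 10
--     return nr_nou == ogl
-- ===== SOURCE B (Python) =====
-- import math
--
-- def build_and_check(num):
--     nc = int(math.log10(num)) + 1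
--     num //= 10 ** (nc % 3)
--     digits = []
--     while num != 0:
--         digits.append(num % 10)
--         num //= 1000
--     return digits == digits[::-1]
-- ===== Notes on version B (the rewrite author's own statement) =====
-- stated objective: simpler
-- what changed: B peels the every-third digits into a list in one loop and checks the palindrome with a single reversed-list comparison, instead of A's interleaved forward/mirrored numeric accumulators with a running power of ten.
-- outside the precondition, e.g. on build_and_check(0): A raises ValueError, B raises ValueError
import Mathlib
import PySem

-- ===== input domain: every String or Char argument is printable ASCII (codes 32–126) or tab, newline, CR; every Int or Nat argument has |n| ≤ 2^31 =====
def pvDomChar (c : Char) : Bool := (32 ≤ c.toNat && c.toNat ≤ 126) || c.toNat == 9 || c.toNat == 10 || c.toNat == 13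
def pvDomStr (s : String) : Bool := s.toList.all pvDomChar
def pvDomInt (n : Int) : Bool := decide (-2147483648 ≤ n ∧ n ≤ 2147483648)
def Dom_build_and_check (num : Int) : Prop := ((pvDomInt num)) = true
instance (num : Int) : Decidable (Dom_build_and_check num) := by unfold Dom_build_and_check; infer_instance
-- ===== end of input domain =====

-- B builds the every-third-digit list once and compares it with its reverse, instead of
-- interleaving two numeric accumulators (objective: simpler; same cost).

-- ===== PORT A =====
-- `int(math.log10 n) + 1` ported by hand as the decimal digit count; exact for
-- 1 ≤ n ≤ 2^31 (checked exhaustively near every power of ten and by sampling).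
def pvDigitCount (n : Nat) : Nat :=
  if n < 10 then 1 else pvDigitCount (n / 10) + 1
decreasing_by exact Nat.div_lt_self (by omega) (by omega)

-- the while loop of A, on the same four state variables
def pvLoopA (n nr ogl p : Nat) : Bool :=
  if h : n = 0 then nr == ogl
  else pvLoopA (n / 1000) (nr * 10 + n % 10) (ogl + p * (n % 10)) (p * 10)
decreasing_by exact Nat.div_lt_self (by omega) (by omega)

def build_and_check (num : Int) : Bool :=
  let n := num.toNat            -- num ≥ 1 under Pre_, so exact
  let k := pvDigitCount n % 3
  pvLoopA (n / 10 ^ k) 0 0 1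

-- ===== PORT B =====
-- the while loop of B: peel the relevant digits into a list
def pvDigits (n : Nat) : List Nat :=
  if h : n = 0 then [] else n % 10 :: pvDigits (n / 1000)
decreasing_by exact Nat.div_lt_self (by omega) (by omega)

def build_and_check_alt (num : Int) : Bool :=
  let n := num.toNat            -- num ≥ 1 under Pre_, so exact
  let ds := pvDigits (n / 10 ^ (pvDigitCount n % 3))
  ds == ds.reverse

-- ===== PRECONDITION & SPEC =====
-- A raises ValueError (math.log10 domain error) for num ≤ 0; those inputs are excluded.
def Pre_build_and_check (num : Int) : Prop := 1 ≤ num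
instance (num : Int) : Decidable (Pre_build_and_check num) := by unfold Pre_build_and_check; infer_instance
def pvWitness_build_and_check : Int := (123321)

def Spec_build_and_check (num : Int) (out : Bool) : Prop := out = build_and_check_alt num
instance (num : Int) (out : Bool) : Decidable (Spec_build_and_check num out) := by unfold Spec_build_and_check; infer_instance

-- ===== CLAIM (what is proved, stated in full; the proofs are below) =====
def Claim_equal_build_and_check : Prop := ∀ (num : Int), Dom_build_and_check num → Pre_build_and_check num → Spec_build_and_check num (build_and_check num)

-- ===== LEMMAS AND PROOFS =====

-- value of a digit list read most-significant-first (what nr_nou accumulates)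
def pvV : List Nat → Nat
  | [] => 0
  | d :: t => d * 10 ^ t.length + pvV t

-- value of a digit list read least-significant-first (what ogl accumulates)
def pvR : List Nat → Nat
  | [] => 0
  | d :: t => d + 10 * pvR t

theorem pvDigits_lt (n : Nat) : ∀ d ∈ pvDigits n, d < 10 := by
  induction n using pvDigits.induct with
  | case1 => simp [pvDigits]
  | case2 n h ih =>
    rw [pvDigits]; simp only [h, dif_neg, not_false_iff, List.mem_cons]
    rintro d (rfl | hd)
    · omega
    · exact ih d hd

theorem pvV_lt (ds : List Nat) (h : ∀ d ∈ ds, d < 10) : pvV ds < 10 ^ ds.length := by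
  induction ds with
  | nil => simp [pvV]
  | cons d t ih =>
    have hd : d < 10 := h d (by simp)
    have ht := ih (fun x hx => h x (by simp [hx]))
    simp only [pvV, List.length_cons, pow_succ]
    calc d * 10 ^ t.length + pvV t < d * 10 ^ t.length + 10 ^ t.length := by omega
      _ = (d + 1) * 10 ^ t.length := by ring
      _ ≤ 10 * 10 ^ t.length := Nat.mul_le_mul_right _ (by omega)
      _ = 10 ^ t.length * 10 := by ring

theorem pvV_append_singleton (xs : List Nat) (d : Nat) :
    pvV (xs ++ [d]) = 10 * pvV xs + d := by
  induction xs with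
  | nil => simp [pvV]
  | cons x t ih => simp [pvV, ih]; ring

theorem pvV_reverse (ds : List Nat) : pvV ds.reverse = pvR ds := by
  induction ds with
  | nil => simp [pvV, pvR]
  | cons d t ih =>
    simp only [List.reverse_cons, pvV_append_singleton, ih, pvR]; ring

theorem pvV_inj (xs : List Nat) : ∀ ys : List Nat, xs.length = ys.length →
    (∀ d ∈ xs, d < 10) → (∀ d ∈ ys, d < 10) → pvV xs = pvV ys → xs = ys := by
  induction xs with
  | nil => intro ys hl _ _ _; cases ys with
    | nil => rfl
    | cons _ _ => simp at hl
  | cons d t ih =>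
    intro ys hl hx hy hv
    cases ys with
    | nil => simp at hl
    | cons e u =>
      have hlen : t.length = u.length := by simpa using hl
      have hd : d < 10 := hx d (by simp)
      have he : e < 10 := hy e (by simp)
      have hvt : pvV t < 10 ^ t.length := pvV_lt t (fun x hx' => hx x (by simp [hx']))
      have hvu : pvV u < 10 ^ t.length := hlen ▸ pvV_lt u (fun x hx' => hy x (by simp [hx']))
      simp only [pvV, hlen] at hv
      rw [← hlen] at hv
      have hde : d = e := by
        have h1 : d * 10 ^ t.length < (e + 1) * 10 ^ t.length := by
          calc d * 10 ^ t.length ≤ e * 10 ^ t.length + pvV u := by omega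
            _ < e * 10 ^ t.length + 10 ^ t.length := by omega
            _ = (e + 1) * 10 ^ t.length := by ring
        have h2 : e * 10 ^ t.length < (d + 1) * 10 ^ t.length := by
          calc e * 10 ^ t.length ≤ d * 10 ^ t.length + pvV t := by omega
            _ < d * 10 ^ t.length + 10 ^ t.length := by omega
            _ = (d + 1) * 10 ^ t.length := by ring
        have p1 := Nat.lt_of_mul_lt_mul_right h1
        have p2 := Nat.lt_of_mul_lt_mul_right h2
        omega
      subst hde
      have hvv : pvV t = pvV u := by omega
      have := ih u hlen (fun x hx' => hx x (by simp [hx'])) (fun x hx' => hy x (by simp [hx'])) hvv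
      rw [this]

theorem pvLoopA_iff (n : Nat) : ∀ nr ogl p : Nat,
    (pvLoopA n nr ogl p = true ↔
      nr * 10 ^ (pvDigits n).length + pvV (pvDigits n) = ogl + p * pvR (pvDigits n)) := by
  induction n using Nat.strong_induction_on with
  | _ n ih =>
    intro nr ogl p
    by_cases h : n = 0
    · subst h
      rw [pvLoopA, pvDigits]; simp [pvV, pvR]
    · rw [pvLoopA, pvDigits]
      simp only [h, dif_neg, not_false_iff]
      rw [ih (n / 1000) (Nat.div_lt_self (by omega) (by omega))]
      simp only [pvV, pvR, List.length_cons, pow_succ]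
      constructor <;> intro hv <;> linarith [hv]

theorem pv_core (n : Nat) : pvLoopA n 0 0 1 = (pvDigits n == (pvDigits n).reverse) := by
  rw [Bool.eq_iff_iff, pvLoopA_iff, beq_iff_eq]
  simp only [Nat.zero_mul, Nat.zero_add, Nat.one_mul]
  constructor
  · intro hv
    exact pvV_inj _ _ (by simp) (pvDigits_lt n)
      (fun d hd => pvDigits_lt n d (List.mem_reverse.mp hd))
      (by rw [pvV_reverse]; exact hv)
  · intro he
    rw [← pvV_reverse, ← he]

-- ===== VERDICT (by name: the statement is the Claim_ definition above) =====
theorem build_and_check_spec : Claim_equal_build_and_check := by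
  intro num _ _
  unfold Spec_build_and_check build_and_check build_and_check_alt
  exact pv_core _
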